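-- pv_equiv track=rewrite | github.com/tayyabahamna-design/EDUSENSEI | app.py | build_paragraphs
-- ===== SOURCE A (Python) =====
-- def is_heading_or_label(line):
--     """Check if line is a heading or label that marks end of story"""
--     if not line:
--         return False
--
--     line_lower = line.lower()
--
--     # Section endings
--     section_markers = [
--         'comprehension', 'grammar', 'writing', 'activity', 'project', 'tips',
--         'answer key', 'objectives', 'vocabulary', 'step', 'connect and create',
--         'choose your topic', 'state your opinion', 'diving deeper'
--     ]
--
--     return any(marker in line_lower for marker in section_markers) or line.isupper()
--
-- def build_paragraphs(lines, start_idx):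
--     """Build paragraphs from lines starting at start_idx"""
--     paragraphs = []
--     current_paragraph = []
--
--     for i in range(start_idx, len(lines)):
--         line = lines[i].strip()
--
--         # Empty line or heading marks paragraph break
--         if not line or is_heading_or_label(line):
--             if current_paragraph:
--                 paragraphs.append(' '.join(current_paragraph))
--                 current_paragraph = []
--             if is_heading_or_label(line):
--                 break
--         elif len(line) > 3:  # Ignore very short lines
--             current_paragraph.append(line)
--
--     # Add remaining content
--     if current_paragraph:
--         paragraphs.append(' '.join(current_paragraph))
--
--     return paragraphs
-- ===== SOURCE B (Python) =====
-- def is_heading_or_label(line):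
--     """Check if line is a heading or label that marks end of story"""
--     if not line:
--         return False
--
--     line_lower = line.lower()
--
--     section_markers = [
--         'comprehension', 'grammar', 'writing', 'activity', 'project', 'tips',
--         'answer key', 'objectives', 'vocabulary', 'step', 'connect and create',
--         'choose your topic', 'state your opinion', 'diving deeper'
--     ]
--
--     return any(marker in line_lower for marker in section_markers) or line.isupper()
--
--
-- def _first_heading_index(stripped):
--     """Index of the first heading line, or len(stripped) if none."""
--     for j, s in enumerate(stripped):
--         if is_heading_or_label(s):
--             return j
--     return len(stripped)
--
--
-- def _segments(body):
--     """Split body into segments separated by empty lines."""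
--     segs, seg = [], []
--     for s in body:
--         if s == '':
--             segs.append(seg)
--             seg = []
--         else:
--             seg.append(s)
--     segs.append(seg)
--     return segs
--
--
-- def build_paragraphs(lines, start_idx):
--     """Build paragraphs from lines starting at start_idx"""
--     stripped = [lines[i].strip() for i in range(start_idx, len(lines))]
--     body = stripped[:_first_heading_index(stripped)]
--     out = []
--     for seg in _segments(body):
--         kept = [s for s in seg if len(s) > 3]
--         if kept:
--             out.append(' '.join(kept))
--     return out
-- ===== Notes on version B (the rewrite author's own statement) =====
-- stated objective: alternative
-- what changed: Replaces A's single interleaved loop with paragraph/current accumulators and an in-loop break by a three-stage pipeline: strip all lines in range, cut at the first heading line, split the prefix into segments at empty lines, then filter short lines and join each non-empty segment.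
import Mathlib
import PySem

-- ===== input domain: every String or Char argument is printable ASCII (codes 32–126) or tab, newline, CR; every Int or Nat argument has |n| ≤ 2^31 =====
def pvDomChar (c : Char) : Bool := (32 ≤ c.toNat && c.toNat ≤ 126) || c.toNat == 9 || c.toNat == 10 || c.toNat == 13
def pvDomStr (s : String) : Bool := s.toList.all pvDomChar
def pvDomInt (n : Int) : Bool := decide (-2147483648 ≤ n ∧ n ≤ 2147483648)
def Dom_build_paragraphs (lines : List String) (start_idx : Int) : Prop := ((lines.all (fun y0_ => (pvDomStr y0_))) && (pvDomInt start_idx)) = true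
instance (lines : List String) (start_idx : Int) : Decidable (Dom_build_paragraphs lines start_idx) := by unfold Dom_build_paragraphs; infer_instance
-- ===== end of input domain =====

-- B replaces A's interleaved accumulator loop by a locate-heading-cutoff, split-into-segments,
-- filter-and-join pipeline (objective: alternative decomposition, same cost).


-- ===== PORT A =====

def pvSectionMarkers : List String :=
  ["comprehension", "grammar", "writing", "activity", "project", "tips",
   "answer key", "objectives", "vocabulary", "step", "connect and create",
   "choose your topic", "state your opinion", "diving deeper"]

-- hand port of Python str.isupper (PySem has only the Char predicate); exact on ASCII,
-- where the cased characters are exactly the letters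
def pvStrIsupper (line : String) : Bool :=
  line.toList.any (fun c => PySem.Chars.isalpha c) &&
    line.toList.all (fun c => !PySem.Chars.islower c)

-- shared helper: both Python sources contain the identical is_heading_or_label
def is_heading_or_label (line : String) : Bool :=
  if line = "" then false
  else
    let line_lower := PySem.Str.lower line
    pvSectionMarkers.any (fun marker => PySem.Str.isIn marker line_lower) || pvStrIsupper line

-- the loop of A: state (paragraphs, current_paragraph), break on heading, final flush
def pvAGo (lines : List String) (idxs : List Int) (paragraphs current : List String) : List String :=
  match idxs with
  | [] => if current = [] then paragraphs else paragraphs ++ [PySem.Str.join " " current]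
  | i :: rest =>
    let line := PySem.Str.strip (PySem.List.pyGetD lines i "")
    if line = "" ∨ is_heading_or_label line then
      let paragraphs' := if current = [] then paragraphs else paragraphs ++ [PySem.Str.join " " current]
      if is_heading_or_label line then paragraphs'   -- break; final flush adds nothing (current = [])
      else pvAGo lines rest paragraphs' []
    else if 3 < PySem.Str.len line then pvAGo lines rest paragraphs (current ++ [line])
    else pvAGo lines rest paragraphs current

def build_paragraphs (lines : List String) (start_idx : Int) : List String :=
  pvAGo lines (PySem.List.pyRange start_idx lines.length) [] []

-- ===== PORT B =====

-- Source B _first_heading_index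
def pvFirstHeadingIdx : List String → Nat
  | [] => 0
  | s :: rest => if is_heading_or_label s then 0 else pvFirstHeadingIdx rest + 1

-- Source B _segments (the running seg is the extra argument)
def pvSegGo : List String → List String → List (List String)
  | [], seg => [seg]
  | s :: rest, seg => if s = "" then seg :: pvSegGo rest [] else pvSegGo rest (seg ++ [s])

def build_paragraphs_alt (lines : List String) (start_idx : Int) : List String :=
  let stripped := (PySem.List.pyRange start_idx lines.length).map
      (fun i => PySem.Str.strip (PySem.List.pyGetD lines i ""))
  let body := stripped.take (pvFirstHeadingIdx stripped)
  (pvSegGo body []).foldl (fun out seg =>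
      let kept := seg.filter (fun s => 3 < PySem.Str.len s)
      if kept ≠ [] then out ++ [PySem.Str.join " " kept] else out) []

-- ===== PRECONDITION & SPEC =====
-- Pre_ excludes exactly the inputs where Python A raises IndexError: a negative start_idx
-- beyond -len(lines) makes lines[i] raise for the first indices of the range.
def Pre_build_paragraphs (lines : List String) (start_idx : Int) : Prop :=
  -(lines.length : Int) ≤ start_idx ∨ (lines.length : Int) ≤ start_idx
instance (lines : List String) (start_idx : Int) : Decidable (Pre_build_paragraphs lines start_idx) := by
  unfold Pre_build_paragraphs; infer_instance

def pvWitness_build_paragraphs : List String × Int := (["once upon a time", "", "GRAMMAR"], 0)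

def Spec_build_paragraphs (lines : List String) (start_idx : Int) (out : List String) : Prop := out = build_paragraphs_alt lines start_idx
instance (lines : List String) (start_idx : Int) (out : List String) : Decidable (Spec_build_paragraphs lines start_idx out) := by unfold Spec_build_paragraphs; infer_instance

-- ===== CLAIM (what is proved, stated in full; the proofs are below) =====
def Claim_equal_build_paragraphs : Prop := ∀ (lines : List String) (start_idx : Int), Dom_build_paragraphs lines start_idx → Pre_build_paragraphs lines start_idx → Spec_build_paragraphs lines start_idx (build_paragraphs lines start_idx)

-- ===== LEMMAS AND PROOFS =====

-- abbreviations used only by the proofs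
def pvEmitSeg (seg : List String) : List String :=
  let kept := seg.filter (fun s => 3 < PySem.Str.len s)
  if kept ≠ [] then [PySem.Str.join " " kept] else []

-- A's loop over the string list directly (indices already resolved and stripped)
def pvAGo' (ss : List String) (paragraphs current : List String) : List String :=
  match ss with
  | [] => if current = [] then paragraphs else paragraphs ++ [PySem.Str.join " " current]
  | line :: rest =>
    if line = "" ∨ is_heading_or_label line then
      let paragraphs' := if current = [] then paragraphs else paragraphs ++ [PySem.Str.join " " current]
      if is_heading_or_label line then paragraphs'
      else pvAGo' rest paragraphs' []
    else if 3 < PySem.Str.len line then pvAGo' rest paragraphs (current ++ [line])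
    else pvAGo' rest paragraphs current

-- fused form of B's pipeline
def pvBFused : List String → List String → List String
  | [], seg => pvEmitSeg seg
  | s :: rest, seg =>
    if is_heading_or_label s then pvEmitSeg seg
    else if s = "" then pvEmitSeg seg ++ pvBFused rest []
    else pvBFused rest (seg ++ [s])

theorem pvAGo_eq_map (lines : List String) (idxs : List Int) (paragraphs current : List String) :
    pvAGo lines idxs paragraphs current
      = pvAGo' (idxs.map (fun i => PySem.Str.strip (PySem.List.pyGetD lines i ""))) paragraphs current := by
  induction idxs generalizing paragraphs current with
  | nil => rfl
  | cons i rest ih => simp only [pvAGo, pvAGo', List.map]; split_ifs <;> simp [ih]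

theorem pvAGo'_eq_bFused (ss : List String) (seg paragraphs : List String) :
    pvAGo' ss paragraphs (seg.filter (fun s => 3 < PySem.Str.len s)) = paragraphs ++ pvBFused ss seg := by
  induction ss generalizing seg paragraphs with
  | nil =>
    simp only [pvAGo', pvBFused, pvEmitSeg]
    split_ifs <;> simp_all
  | cons s rest ih =>
    by_cases hs : s = ""
    · subst hs
      have hh : is_heading_or_label "" = false := by simp [is_heading_or_label]
      simp only [pvAGo', pvBFused, pvEmitSeg, hh]
      have := ih [] (if (seg.filter (fun s => 3 < PySem.Str.len s)) = [] then paragraphs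
        else paragraphs ++ [PySem.Str.join " " (seg.filter (fun s => 3 < PySem.Str.len s))])
      simp only [List.filter_nil] at this
      simp only [this]
      split_ifs with h1 <;> simp_all
    · by_cases hh : is_heading_or_label s = true
      · simp only [pvAGo', pvBFused, pvEmitSeg, hh, hs]
        split_ifs with h1 <;> simp_all
      · simp only [Bool.not_eq_true] at hh
        have hfil : ∀ t : List String, (t ++ [s]).filter (fun s => 3 < PySem.Str.len s)
            = t.filter (fun s => 3 < PySem.Str.len s)
              ++ (if 3 < PySem.Str.len s then [s] else []) := by
          intro t
          rw [List.filter_append]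
          congr 1
          simp [List.filter_singleton]
        by_cases hp : 3 < PySem.Str.len s
        · have h1 : pvAGo' (s :: rest) paragraphs (seg.filter (fun s => 3 < PySem.Str.len s))
              = pvAGo' rest paragraphs ((seg ++ [s]).filter (fun s => 3 < PySem.Str.len s)) := by
            rw [hfil seg]
            simp only [pvAGo', hs, hh, hp]
            simp
          rw [h1, ih]
          simp only [pvBFused, hh, hs]
          simp
        · have h1 : pvAGo' (s :: rest) paragraphs (seg.filter (fun s => 3 < PySem.Str.len s))
              = pvAGo' rest paragraphs ((seg ++ [s]).filter (fun s => 3 < PySem.Str.len s)) := by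
            rw [hfil seg]
            simp only [pvAGo', hs, hh, hp]
            simp
          rw [h1, ih]
          simp only [pvBFused, hh, hs]
          simp

def pvEmitStep (out seg : List String) : List String :=
  let kept := seg.filter (fun s => 3 < PySem.Str.len s)
  if kept ≠ [] then out ++ [PySem.Str.join " " kept] else out

theorem pvEmitStep_eq (out seg : List String) : pvEmitStep out seg = out ++ pvEmitSeg seg := by
  simp only [pvEmitStep, pvEmitSeg]
  split_ifs <;> simp

theorem pvFoldl_segGo (ss : List String) (seg out : List String) :
    (pvSegGo (ss.take (pvFirstHeadingIdx ss)) seg).foldl pvEmitStep out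
      = out ++ pvBFused ss seg := by
  induction ss generalizing seg out with
  | nil =>
    simp only [pvFirstHeadingIdx, List.take, pvSegGo, List.foldl, pvBFused]
    exact pvEmitStep_eq out seg
  | cons s rest ih =>
    by_cases hh : is_heading_or_label s = true
    · simp only [pvFirstHeadingIdx, hh, if_pos, List.take, pvSegGo, List.foldl, pvBFused]
      exact pvEmitStep_eq out seg
    · simp only [Bool.not_eq_true] at hh
      simp only [pvFirstHeadingIdx, hh, Bool.false_eq_true, if_false, List.take_succ_cons]
      by_cases hs : s = ""
      · subst hs
        simp only [pvSegGo, if_pos, List.foldl, pvBFused, hh, Bool.false_eq_true, if_false]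
        rw [ih, pvEmitStep_eq, List.append_assoc]
      · simp only [pvSegGo, hs, pvBFused, hh, Bool.false_eq_true, if_false]
        rw [ih]

-- ===== VERDICT (by name: the statement is the Claim_ definition above) =====
theorem build_paragraphs_spec : Claim_equal_build_paragraphs := by
  intro lines start_idx _ _
  unfold Spec_build_paragraphs build_paragraphs build_paragraphs_alt
  rw [pvAGo_eq_map]
  exact (pvAGo'_eq_bFused _ [] []).trans (pvFoldl_segGo _ [] []).symm
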